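-- pv_equiv track=rewrite | github.com/LanTy7/model_c | scripts/test_taxoniq.py | extract_organism
-- ===== SOURCE A (Python) =====
-- def extract_organism(header):
--     """Extract organism name from UniProt FASTA header"""
--     if 'OS=' in header:
--         start = header.find('OS=') + 3
--         end = len(header)
--         for marker in [' OX=', ' GN=', ' PE=', ' SV=']:
--             pos = header.find(marker, start)
--             if pos != -1 and pos < end:
--                 end = pos
--         return header[start:end].strip()
--     return 'unknown'
-- ===== SOURCE B (Python) =====
-- def extract_organism(header):
--     """Extract organism name from UniProt FASTA header"""
--     i = header.find('OS=')
--     if i == -1: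
--         return 'unknown'
--     tail = header[i + 3:]
--     markers = (' OX=', ' GN=', ' PE=', ' SV=')
--     for j in range(len(tail)):
--         if tail[j:j + 4] in markers:
--             return tail[:j].strip()
--     return tail.strip()
-- ===== Notes on version B (the rewrite author's own statement) =====
-- stated objective: alternative
-- what changed: Replaced A's four independent header.find(marker, start) scans with min-position tracking by a single left-to-right scan over the tail after 'OS=' that returns at the first position where any of the four markers starts.
import Mathlib
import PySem

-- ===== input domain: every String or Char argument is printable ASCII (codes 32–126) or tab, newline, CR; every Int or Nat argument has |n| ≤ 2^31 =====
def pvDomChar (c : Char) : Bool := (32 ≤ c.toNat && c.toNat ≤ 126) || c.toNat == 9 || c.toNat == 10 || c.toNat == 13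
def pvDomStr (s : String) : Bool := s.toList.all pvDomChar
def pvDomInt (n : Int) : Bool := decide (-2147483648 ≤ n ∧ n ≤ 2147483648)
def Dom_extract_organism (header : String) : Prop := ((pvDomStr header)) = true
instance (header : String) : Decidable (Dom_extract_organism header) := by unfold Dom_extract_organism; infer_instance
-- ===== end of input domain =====

-- B replaces A's four independent header.find scans with min-position tracking by a single
-- left-to-right scan over the tail after 'OS=' that stops at the first marker occurrence
-- (objective: alternative single-pass algorithm; not claimed faster).

-- ===== PORT A =====
def pvMarkersA : List String := [" OX=", " GN=", " PE=", " SV="]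

-- one iteration of A's 'for marker in [...]' loop body over the running 'end'
def pvStepA (header : String) (start : Int) (e : Int) (m : String) : Int :=
  let pos := PySem.Str.findFrom header m start
  if pos ≠ -1 ∧ pos < e then pos else e

def extract_organism (header : String) : String :=
  if PySem.Str.isIn "OS=" header = true then
    let start : Int := PySem.Str.find header "OS=" + 3
    let stop : Int := pvMarkersA.foldl (pvStepA header start) (PySem.Str.len header)
    PySem.Str.strip (PySem.Str.slice header (some start) (some stop))
  else "unknown"

-- ===== PORT B =====
def pvMarkersB : List (List Char) := [" OX=".toList, " GN=".toList, " PE=".toList, " SV=".toList]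

-- B's 'for j in range(len(tail)): if tail[j:j+4] in markers: …' as structural recursion on the
-- suffix; tail[j:j+4] (j ≥ 0) is exactly (tail.drop j).take 4, i.e. take 4 of the current suffix
def pvScanB : List Char → Nat → Option Nat
  | [], _ => none
  | c :: rest, j =>
    if pvMarkersB.any (fun m => (c :: rest).take 4 == m) then some j
    else pvScanB rest (j + 1)

def extract_organism_alt (header : String) : String :=
  let i := PySem.Str.find header "OS="
  if i = -1 then "unknown"
  else
    -- header[i+3:] with i ≥ 0: slicing from a nonnegative bound is List.drop
    let tail := header.toList.drop (i + 3).toNat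
    match pvScanB tail 0 with
    | some j => String.ofList (PySem.Chars.strip (tail.take j))   -- tail[:j].strip(), j ≥ 0
    | none => String.ofList (PySem.Chars.strip tail)              -- tail.strip()

-- ===== PRECONDITION & SPEC =====
def Spec_extract_organism (header : String) (out : String) : Prop := out = extract_organism_alt header
instance (header : String) (out : String) : Decidable (Spec_extract_organism header out) := by unfold Spec_extract_organism; infer_instance

-- ===== CLAIM (what is proved, stated in full; the proofs are below) =====
def Claim_equal_extract_organism : Prop := ∀ (header : String), Dom_extract_organism header → Spec_extract_organism header (extract_organism header)

-- ===== LEMMAS AND PROOFS =====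

theorem pvMarker_prefix_iff (m l : List Char) (hm : m.length = 4) :
    ((l.take 4 == m) = true) ↔ m <+: l := by
  rw [beq_iff_eq, List.prefix_iff_eq_take, ← hm]
  exact eq_comm

theorem pvMarkersB_len : ∀ m ∈ pvMarkersB, m.length = 4 := by decide

theorem pvScanB_none (l : List Char) : ∀ (j : Nat), pvScanB l j = none →
    ∀ (i : Nat), ∀ m ∈ pvMarkersB, ¬ m <+: l.drop i := by
  induction l with
  | nil =>
    intro j _ i m hm hp
    simp only [List.drop_nil, List.prefix_nil] at hp
    subst hp
    simp [pvMarkersB] at hm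
  | cons c rest ih =>
    intro j h i m hm hp
    unfold pvScanB at h
    by_cases hc : pvMarkersB.any (fun m => ((c :: rest).take 4 == m)) = true
    · rw [if_pos hc] at h; exact absurd h (by simp)
    · rw [if_neg hc] at h
      cases i with
      | zero =>
        exact hc (List.any_eq_true.mpr ⟨m, hm,
          (pvMarker_prefix_iff m (c :: rest) (pvMarkersB_len m hm)).mpr (by simpa using hp)⟩)
      | succ i' =>
        exact ih (j + 1) h i' m hm (by simpa using hp)

theorem pvScanB_some (l : List Char) : ∀ (j k : Nat), pvScanB l j = some k →
    j ≤ k ∧ (∃ m ∈ pvMarkersB, m <+: l.drop (k - j)) ∧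
      ∀ i < k - j, ∀ m ∈ pvMarkersB, ¬ m <+: l.drop i := by
  induction l with
  | nil => intro j k h; exact absurd h (by simp [pvScanB])
  | cons c rest ih =>
    intro j k h
    unfold pvScanB at h
    by_cases hc : pvMarkersB.any (fun m => ((c :: rest).take 4 == m)) = true
    · rw [if_pos hc] at h
      obtain rfl : j = k := by simpa using h
      refine ⟨le_rfl, ?_, by omega⟩
      obtain ⟨m, hm, hpm⟩ := List.any_eq_true.mp hc
      exact ⟨m, hm, by simpa using (pvMarker_prefix_iff m (c :: rest) (pvMarkersB_len m hm)).mp hpm⟩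
    · rw [if_neg hc] at h
      obtain ⟨h1, ⟨m, hm, hpm⟩, hmin⟩ := ih (j + 1) k h
      refine ⟨by omega, ⟨m, hm, ?_⟩, ?_⟩
      · have heq : (c :: rest).drop (k - j) = rest.drop (k - (j + 1)) := by
          have h2 : k - j = (k - (j + 1)) + 1 := by omega
          simp [h2]
        rwa [heq]
      · intro i hi m' hm' hp'
        cases i with
        | zero =>
          exact hc (List.any_eq_true.mpr ⟨m', hm',
            (pvMarker_prefix_iff m' (c :: rest) (pvMarkersB_len m' hm')).mpr (by simpa using hp')⟩)
        | succ i' =>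
          exact hmin i' (by omega) m' hm' (by simpa using hp')

-- A marker with no occurrence before position j: its Chars.find is -1, or it is at least j
-- and its occurrence leaves room for the 4 marker characters.
theorem pvFind_fact (tail m : List Char) (j : Nat) (hm4 : m.length = 4)
    (hmin : ∀ i < j, ¬ m <+: tail.drop i) :
    PySem.Chars.find tail m = -1 ∨
      ((j : Int) ≤ PySem.Chars.find tail m ∧
        PySem.Chars.find tail m + 4 ≤ (tail.length : Int)) := by
  by_cases h : PySem.Chars.find tail m = -1
  · exact Or.inl h
  · right
    have hge := PySem.Chars.neg_one_le_find tail m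
    have h0 : 0 ≤ PySem.Chars.find tail m := by omega
    obtain ⟨hp, -⟩ := PySem.Chars.find_spec h0
    have hlen : m.length ≤ (tail.drop (PySem.Chars.find tail m).toNat).length := hp.length_le
    rw [List.length_drop] at hlen
    have hj : ¬ ((PySem.Chars.find tail m).toNat < j) := fun hlt => hmin _ hlt hp
    omega

-- The marker that first occurs exactly at position j has Chars.find = j.
theorem pvFind_at (tail m : List Char) (j : Nat) (hpj : m <+: tail.drop j)
    (hmin : ∀ i < j, ¬ m <+: tail.drop i) :
    PySem.Chars.find tail m = (j : Int) := by
  have hin : PySem.Chars.isIn m tail = true :=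
    (PySem.Chars.exists_prefix_drop_iff_isIn m tail).mp ⟨j, hpj⟩
  have h0 : 0 ≤ PySem.Chars.find tail m :=
    (PySem.Chars.find_nonneg_iff tail m).mpr ((PySem.Chars.isIn_iff_infix m tail).mp hin)
  obtain ⟨hp, hfmin⟩ := PySem.Chars.find_spec h0
  have h1 : ¬ (j < (PySem.Chars.find tail m).toNat) := fun hlt => hfmin j hlt hpj
  have h2 : ¬ ((PySem.Chars.find tail m).toNat < j) := fun hlt => hmin _ hlt hp
  omega

-- pure arithmetic of A's min-tracking loop, unrolled over the four markers:
-- when no marker occurs, the initial length survives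
theorem pvFoldNone (len p1 p2 p3 p4 e1 e2 e3 e4 : Int)
    (he1 : e1 = if p1 ≠ -1 ∧ p1 < len then p1 else len)
    (he2 : e2 = if p2 ≠ -1 ∧ p2 < e1 then p2 else e1)
    (he3 : e3 = if p3 ≠ -1 ∧ p3 < e2 then p3 else e2)
    (he4 : e4 = if p4 ≠ -1 ∧ p4 < e3 then p4 else e3)
    (h1 : p1 = -1) (h2 : p2 = -1) (h3 : p3 = -1) (h4 : p4 = -1) : e4 = len := by
  subst he1; subst he2; subst he3; subst he4
  split_ifs <;> omega

-- and when the earliest occurrence is at K, the loop returns K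
theorem pvFoldMin (len p1 p2 p3 p4 K e1 e2 e3 e4 : Int)
    (he1 : e1 = if p1 ≠ -1 ∧ p1 < len then p1 else len)
    (he2 : e2 = if p2 ≠ -1 ∧ p2 < e1 then p2 else e1)
    (he3 : e3 = if p3 ≠ -1 ∧ p3 < e2 then p3 else e2)
    (he4 : e4 = if p4 ≠ -1 ∧ p4 < e3 then p4 else e3)
    (hK0 : 0 ≤ K) (hK : K + 4 ≤ len)
    (h1 : p1 = -1 ∨ (K ≤ p1 ∧ p1 + 4 ≤ len))
    (h2 : p2 = -1 ∨ (K ≤ p2 ∧ p2 + 4 ≤ len))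
    (h3 : p3 = -1 ∨ (K ≤ p3 ∧ p3 + 4 ≤ len))
    (h4 : p4 = -1 ∨ (K ≤ p4 ∧ p4 + 4 ≤ len))
    (hex : p1 = K ∨ p2 = K ∨ p3 = K ∨ p4 = K) : e4 = K := by
  subst he1; subst he2; subst he3; subst he4
  split_ifs <;> omega

theorem pv_main (header : String) : extract_organism header = extract_organism_alt header := by
  by_cases hin : PySem.Str.isIn "OS=" header = true
  · have hinf : ("OS=".toList : List Char) <:+: header.toList :=
      (PySem.Chars.isIn_iff_infix _ _).mp (by simpa [PySem.Str.isIn] using hin)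
    have hf0 : 0 ≤ PySem.Str.find header "OS=" := by
      simpa [PySem.Str.find] using (PySem.Chars.find_nonneg_iff header.toList "OS=".toList).mpr hinf
    obtain ⟨k, hk⟩ : ∃ k : Nat, PySem.Str.find header "OS=" = (k : Int) :=
      ⟨(PySem.Str.find header "OS=").toNat, (Int.toNat_of_nonneg hf0).symm⟩
    -- 'OS=' occurs at k, so k + 3 ≤ len
    obtain ⟨hosp, -⟩ := PySem.Chars.find_spec (s := header.toList) (sub := "OS=".toList)
      (by simpa [PySem.Str.find] using hf0)
    have hos3 : ("OS=".toList : List Char).length ≤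
        (header.toList.drop (PySem.Chars.find header.toList "OS=".toList).toNat).length :=
      hosp.length_le
    rw [List.length_drop] at hos3
    have hkk : (PySem.Chars.find header.toList "OS=".toList).toNat = k := by
      have hx : PySem.Chars.find header.toList "OS=".toList = (k : Int) := by
        simpa [PySem.Str.find] using hk
      omega
    have hk3 : k + 3 ≤ header.toList.length := by
      have h3 : ("OS=".toList : List Char).length = 3 := by decide
      omega
    set tail := header.toList.drop (k + 3) with htail
    have htlen : tail.length = header.toList.length - (k + 3) := by
      rw [htail, List.length_drop]
    have hcast : PySem.Str.find header "OS=" + 3 = ((k + 3 : Nat) : Int) := by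
      rw [hk]; push_cast; ring
    -- each findFrom call, expressed through Chars.find on tail
    have hff : ∀ m : String, PySem.Str.findFrom header m (PySem.Str.find header "OS=" + 3) =
        (if PySem.Chars.find tail m.toList = -1 then -1
         else ((k + 3 : Nat) : Int) + PySem.Chars.find tail m.toList) := by
      intro m
      rw [PySem.Str.findFrom, hcast, PySem.Chars.findFrom_natCast _ _ (k + 3) hk3, ← htail]
    have hne : ¬ (PySem.Str.find header "OS=" = -1) := by omega
    have hdropA : (PySem.Str.find header "OS=" + 3).toNat = k + 3 := by omega
    cases hscan : pvScanB tail 0 with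
    | none =>
      have hnone := pvScanB_none tail 0 hscan
      have hfindneg : ∀ m ∈ pvMarkersB, PySem.Chars.find tail m = -1 := by
        intro m hm
        by_contra h
        have hge := PySem.Chars.neg_one_le_find tail m
        obtain ⟨hp, -⟩ := PySem.Chars.find_spec (s := tail) (sub := m) (by omega)
        exact hnone _ m hm hp
      have hp' : ∀ m : String, m.toList ∈ pvMarkersB →
          PySem.Str.findFrom header m (PySem.Str.find header "OS=" + 3) = -1 := by
        intro m hm
        rw [hff, if_pos (hfindneg m.toList hm)]
      have hstop : pvMarkersA.foldl (pvStepA header (PySem.Str.find header "OS=" + 3))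
          (PySem.Str.len header) = PySem.Str.len header := by
        simp only [pvMarkersA, List.foldl, pvStepA]
        exact pvFoldNone (PySem.Str.len header) _ _ _ _ _ _ _ _ rfl rfl rfl rfl
          (hp' " OX=" (by decide)) (hp' " GN=" (by decide))
          (hp' " PE=" (by decide)) (hp' " SV=" (by decide))
      have hslice : PySem.Chars.slice header.toList (some (PySem.Str.find header "OS=" + 3))
          (some (PySem.Str.len header)) = tail := by
        rw [PySem.Str.len_eq, PySem.Chars.slice_eq_listSlice,
          PySem.List.slice_toNat _ (by omega) (by omega)]
        rw [hdropA, htail]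
        exact List.take_of_length_le (by rw [List.length_drop]; omega)
      have hA : extract_organism header = String.ofList (PySem.Chars.strip tail) := by
        simp only [extract_organism, hin, if_true, hstop]
        rw [PySem.Str.strip, PySem.Str.slice]
        simp only [String.toList_ofList]
        rw [hslice]
      have hB : extract_organism_alt header = String.ofList (PySem.Chars.strip tail) := by
        simp only [extract_organism_alt]
        rw [if_neg hne, hdropA, ← htail, hscan]
      rw [hA, hB]
    | some j =>
      obtain ⟨-, ⟨mw, hmw, hpw⟩, hmin⟩ := pvScanB_some tail 0 j hscan
      simp only [Nat.sub_zero] at hpw hmin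
      have hj4 : j + 4 ≤ tail.length := by
        have hl := hpw.length_le
        rw [List.length_drop] at hl
        have hm4 := pvMarkersB_len mw hmw
        omega
      have hfact : ∀ m : String, m.toList ∈ pvMarkersB →
          PySem.Str.findFrom header m (PySem.Str.find header "OS=" + 3) = -1 ∨
          (((k + 3 : Nat) : Int) + (j : Int) ≤
              PySem.Str.findFrom header m (PySem.Str.find header "OS=" + 3) ∧
            PySem.Str.findFrom header m (PySem.Str.find header "OS=" + 3) + 4 ≤
              PySem.Str.len header) := by
        intro m hm
        rw [hff]
        rcases pvFind_fact tail m.toList j (pvMarkersB_len m.toList hm)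
          (fun i hi => hmin i hi m.toList hm) with h | ⟨ha, hb⟩
        · exact Or.inl (by rw [if_pos h])
        · right
          rw [if_neg (by omega), PySem.Str.len_eq]
          constructor <;> omega
      have hat : PySem.Chars.find tail mw = (j : Int) :=
        pvFind_at tail mw j hpw (fun i hi => hmin i hi mw hmw)
      have hex : PySem.Str.findFrom header " OX=" (PySem.Str.find header "OS=" + 3) =
            ((k + 3 : Nat) : Int) + (j : Int) ∨
          PySem.Str.findFrom header " GN=" (PySem.Str.find header "OS=" + 3) =
            ((k + 3 : Nat) : Int) + (j : Int) ∨
          PySem.Str.findFrom header " PE=" (PySem.Str.find header "OS=" + 3) =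
            ((k + 3 : Nat) : Int) + (j : Int) ∨
          PySem.Str.findFrom header " SV=" (PySem.Str.find header "OS=" + 3) =
            ((k + 3 : Nat) : Int) + (j : Int) := by
        have hval : ∀ m : String, m.toList = mw →
            PySem.Str.findFrom header m (PySem.Str.find header "OS=" + 3) =
              ((k + 3 : Nat) : Int) + (j : Int) := by
          intro m hmeq
          rw [hff, hmeq, hat, if_neg (by omega)]
        rcases (by simpa [pvMarkersB] using hmw :
            mw = " OX=".toList ∨ mw = " GN=".toList ∨ mw = " PE=".toList ∨ mw = " SV=".toList)
          with h | h | h | h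
        · exact Or.inl (hval " OX=" h.symm)
        · exact Or.inr (Or.inl (hval " GN=" h.symm))
        · exact Or.inr (Or.inr (Or.inl (hval " PE=" h.symm)))
        · exact Or.inr (Or.inr (Or.inr (hval " SV=" h.symm)))
      have hKlen : ((k + 3 : Nat) : Int) + (j : Int) + 4 ≤ PySem.Str.len header := by
        rw [PySem.Str.len_eq]; omega
      have hstop : pvMarkersA.foldl (pvStepA header (PySem.Str.find header "OS=" + 3))
          (PySem.Str.len header) = ((k + 3 : Nat) : Int) + (j : Int) := by
        simp only [pvMarkersA, List.foldl, pvStepA]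
        exact pvFoldMin (PySem.Str.len header) _ _ _ _ _ _ _ _ _ rfl rfl rfl rfl
          (by omega) hKlen
          (hfact " OX=" (by decide)) (hfact " GN=" (by decide))
          (hfact " PE=" (by decide)) (hfact " SV=" (by decide)) hex
      have hslice : PySem.Chars.slice header.toList (some (PySem.Str.find header "OS=" + 3))
          (some (((k + 3 : Nat) : Int) + (j : Int))) = tail.take j := by
        rw [PySem.Chars.slice_eq_listSlice, PySem.List.slice_toNat _ (by omega) (by omega)]
        rw [hdropA, htail]
        congr 1
        omega
      have hA : extract_organism header = String.ofList (PySem.Chars.strip (tail.take j)) := by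
        simp only [extract_organism, hin, if_true, hstop]
        rw [PySem.Str.strip, PySem.Str.slice]
        simp only [String.toList_ofList]
        rw [hslice]
      have hB : extract_organism_alt header = String.ofList (PySem.Chars.strip (tail.take j)) := by
        simp only [extract_organism_alt]
        rw [if_neg hne, hdropA, ← htail, hscan]
      rw [hA, hB]
  · have hneg : PySem.Str.find header "OS=" = -1 := by
      rw [PySem.Str.find, PySem.Chars.find_eq_neg_one_iff]
      intro hinf
      exact hin (by simpa [PySem.Str.isIn] using (PySem.Chars.isIn_iff_infix _ _).mpr hinf)
    rw [extract_organism, if_neg hin]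
    simp only [extract_organism_alt]
    rw [if_pos hneg]

-- ===== VERDICT (by name: the statement is the Claim_ definition above) =====
theorem extract_organism_spec : Claim_equal_extract_organism := by
  intro header _
  simp only [Spec_extract_organism]
  exact pv_main header
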